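-- pv_equiv track=rewrite | github.com/need4hack/Diplom-AKA-RESPECT-MONEY-SPREAD-ALWAYS-HUMBLE | services/auth_service/accounts/services.py | _is_legacy_password_hash
-- ===== SOURCE A (Python) =====
-- def _is_legacy_password_hash(stored_hash: str) -> bool:
--     """
--     Detect the project's previous salt$sha256 password format.
--
--     Expected format:
--         <32-char hex salt>$<64-char sha256 hex digest>
--     """
--     if not stored_hash or '$' not in stored_hash:
--         return False
--
--     salt, expected_hash = stored_hash.split('$', 1)
--     return (
--         len(salt) == 32
--         and len(expected_hash) == 64
--         and all(char in '0123456789abcdef' for char in salt.lower())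
--         and all(char in '0123456789abcdef' for char in expected_hash.lower())
--     )
-- ===== SOURCE B (Python) =====
-- def _is_legacy_password_hash(stored_hash: str) -> bool:
--     # Single positional pass: total length must be 97 with '$' at index 32
--     # and hex digits everywhere else; no split, no separate length checks.
--     if len(stored_hash) != 97:
--         return False
--     for i, ch in enumerate(stored_hash):
--         if i == 32:
--             if ch != '$':
--                 return False
--         elif ch.lower() not in '0123456789abcdef':
--             return False
--     return True
-- ===== Notes on version B (the rewrite author's own statement) =====
-- stated objective: alternative
-- what changed: Replaces A's split-on-separator plus two length checks and two per-block character scans by a single positional pass: length must be 97, the dollar separator exactly at index 32, a hex digit at every other index.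
import Mathlib
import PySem

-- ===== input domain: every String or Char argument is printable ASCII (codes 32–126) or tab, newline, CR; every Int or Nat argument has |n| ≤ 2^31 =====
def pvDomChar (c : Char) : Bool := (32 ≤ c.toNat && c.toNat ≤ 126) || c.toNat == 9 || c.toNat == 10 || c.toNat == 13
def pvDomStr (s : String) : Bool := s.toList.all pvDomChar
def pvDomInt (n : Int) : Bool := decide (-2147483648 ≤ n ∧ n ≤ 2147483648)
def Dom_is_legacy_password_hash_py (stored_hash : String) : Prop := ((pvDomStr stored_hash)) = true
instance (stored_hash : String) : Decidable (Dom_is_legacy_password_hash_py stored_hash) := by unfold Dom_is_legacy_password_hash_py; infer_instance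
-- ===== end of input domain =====

-- B replaces A's split + two length checks + two character scans by one
-- positional pass over the string (length 97, '$' at index 32, hex elsewhere);
-- objective: alternative (same cost, different decomposition).

-- ===== PORT A =====
def pvHex : List Char := "0123456789abcdef".toList

def is_legacy_password_hash_py (stored_hash : String) : Bool :=
  if stored_hash.toList.isEmpty || !(PySem.Chars.isIn ['$'] stored_hash.toList) then false
  else
    match PySem.Chars.splitOnMax stored_hash.toList ['$'] 1 with
    | [salt, expected_hash] =>
        decide (salt.length = 32) && decide (expected_hash.length = 64)
        && (PySem.Chars.lower salt).all (fun ch => PySem.Chars.isIn [ch] pvHex)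
        && (PySem.Chars.lower expected_hash).all (fun ch => PySem.Chars.isIn [ch] pvHex)
    | _ => false  -- unreachable: split(sep, 1) on a string containing sep yields exactly two pieces

-- ===== PORT B =====
def is_legacy_password_hash_py_alt (stored_hash : String) : Bool :=
  if PySem.Str.len stored_hash ≠ 97 then false
  else
    (PySem.List.enumerate stored_hash.toList).all (fun p =>
      if p.1 == 32 then p.2 == '$'
      else PySem.Chars.isIn [PySem.Chars.lowerChar p.2] pvHex)

-- ===== PRECONDITION & SPEC =====
def Spec_is_legacy_password_hash_py (stored_hash : String) (out : Bool) : Prop := out = is_legacy_password_hash_py_alt stored_hash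
instance (stored_hash : String) (out : Bool) : Decidable (Spec_is_legacy_password_hash_py stored_hash out) := by unfold Spec_is_legacy_password_hash_py; infer_instance

-- ===== CLAIM (what is proved, stated in full; the proofs are below) =====
def Claim_equal_is_legacy_password_hash_py : Prop := ∀ (stored_hash : String), Dom_is_legacy_password_hash_py stored_hash → Spec_is_legacy_password_hash_py stored_hash (is_legacy_password_hash_py stored_hash)

-- ===== LEMMAS AND PROOFS =====

-- the common characterisation: a 32-char lower-hex block, '$', a 64-char lower-hex block
def pvHexL (c : Char) : Prop := PySem.Chars.isIn [PySem.Chars.lowerChar c] pvHex = true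

def pvGood (cs : List Char) : Prop :=
  ∃ s r, cs = s ++ '$' :: r ∧ s.length = 32 ∧ r.length = 64 ∧
    (∀ c ∈ s, pvHexL c) ∧ (∀ c ∈ r, pvHexL c)

lemma hexL_ne_dollar {c : Char} (h : pvHexL c) : c ≠ '$' := by
  rintro rfl; unfold pvHexL at h; exact absurd h (by decide)

lemma singleton_infix_iff {α : Type} (a : α) (l : List α) : [a] <:+: l ↔ a ∈ l := by
  constructor
  · intro h; exact h.subset (List.mem_singleton_self a)
  · intro h
    obtain ⟨s, t, rfl⟩ := List.append_of_mem h
    exact ⟨s, t, by simp⟩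

lemma isIn_dollar_iff (cs : List Char) : PySem.Chars.isIn ['$'] cs = true ↔ '$' ∈ cs := by
  rw [PySem.Chars.isIn_iff_infix, singleton_infix_iff]

-- splitOnMax.go facts
lemma go_m_zero (fuel : Nat) (l cur : List Char) (acc : List (List Char)) :
    PySem.Chars.splitOnMax.go ['$'] fuel 0 l cur acc = ((cur.reverse ++ l) :: acc).reverse := by
  cases fuel with
  | zero => rfl
  | succ f => cases l with
    | nil => simp [PySem.Chars.splitOnMax.go]
    | cons c rest => simp [PySem.Chars.splitOnMax.go]

lemma go_split (l : List Char) : ∀ (fuel : Nat) (cur : List Char) (acc : List (List Char)),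
    l.length < fuel → '$' ∈ l →
    PySem.Chars.splitOnMax.go ['$'] fuel 1 l cur acc =
      acc.reverse ++ [cur.reverse ++ l.takeWhile (· ≠ '$'),
                      l.drop ((l.takeWhile (· ≠ '$')).length + 1)] := by
  induction l with
  | nil => intro fuel cur acc _ hm; simp at hm
  | cons c rest ih =>
    intro fuel cur acc hf hm
    cases fuel with
    | zero => omega
    | succ f =>
      by_cases hc : c = '$'
      · subst hc
        have : PySem.Chars.splitOnMax.go ['$'] (f+1) 1 ('$' :: rest) cur acc
            = PySem.Chars.splitOnMax.go ['$'] f 0 rest [] (cur.reverse :: acc) := by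
          simp [PySem.Chars.splitOnMax.go, List.isPrefixOf]
        rw [this, go_m_zero]
        simp [List.takeWhile]
      · have hstep : PySem.Chars.splitOnMax.go ['$'] (f+1) 1 (c :: rest) cur acc
            = PySem.Chars.splitOnMax.go ['$'] f 1 rest (c :: cur) acc := by
          simp [PySem.Chars.splitOnMax.go, List.isPrefixOf]
          intro heq; exact absurd heq.symm hc
        have hm' : '$' ∈ rest := by
          rcases List.mem_cons.mp hm with h | h
          · exact absurd h.symm hc
          · exact h
        rw [hstep, ih f (c :: cur) acc (by simp at hf ⊢; omega) hm']
        simp [List.takeWhile, hc, List.drop_succ_cons]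

lemma splitOnMax_dollar (cs : List Char) (h : '$' ∈ cs) :
    PySem.Chars.splitOnMax cs ['$'] 1 =
      [cs.takeWhile (· ≠ '$'), cs.drop ((cs.takeWhile (· ≠ '$')).length + 1)] := by
  have : ¬ ((1 : Int) < 0) := by decide
  simp only [PySem.Chars.splitOnMax, if_neg this, Int.toNat_one]
  rw [go_split cs (cs.length + 1) [] [] (by omega) h]
  simp

-- decomposition of a list containing '$' at the first-occurrence split point
lemma decomp_of_mem (cs : List Char) (h : '$' ∈ cs) :
    cs = cs.takeWhile (· ≠ '$') ++ '$' :: cs.drop ((cs.takeWhile (· ≠ '$')).length + 1) := by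
  induction cs with
  | nil => simp at h
  | cons c rest ih =>
    by_cases hc : c = '$'
    · subst hc; simp
    · have hm : '$' ∈ rest := by
        rcases List.mem_cons.mp h with h' | h'
        · exact absurd h'.symm hc
        · exact h'
      rw [List.takeWhile_cons_of_pos (by simp [hc])]
      simp only [List.length_cons, List.cons_append, List.drop_succ_cons]
      exact congrArg (c :: ·) (ih hm)

lemma takeWhile_of_no_dollar (s r : List Char) (hs : ∀ c ∈ s, c ≠ '$') :
    (s ++ '$' :: r).takeWhile (· ≠ '$') = s := by
  induction s with
  | nil => simp
  | cons c rest ih =>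
    have hc := hs c (by simp)
    rw [List.cons_append, List.takeWhile_cons_of_pos (by simp [hc])]
    exact congrArg (c :: ·) (ih (fun x hx => hs x (by simp [hx])))

-- A = true ↔ pvGood
lemma portA_iff (stored_hash : String) :
    is_legacy_password_hash_py stored_hash = true ↔ pvGood stored_hash.toList := by
  unfold is_legacy_password_hash_py
  generalize stored_hash.toList = cs
  constructor
  · intro h
    by_cases hd : '$' ∈ cs
    · have hin : PySem.Chars.isIn ['$'] cs = true := (isIn_dollar_iff cs).mpr hd
      have hne : cs.isEmpty = false := by
        cases cs with
        | nil => simp at hd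
        | cons a b => rfl
      rw [hne, hin] at h
      simp only [Bool.not_true, Bool.or_false] at h
      rw [splitOnMax_dollar cs hd] at h
      replace h : (decide ((cs.takeWhile (· ≠ '$')).length = 32) &&
          decide ((cs.drop ((cs.takeWhile (· ≠ '$')).length + 1)).length = 64) &&
          ((PySem.Chars.lower (cs.takeWhile (· ≠ '$'))).all fun ch => PySem.Chars.isIn [ch] pvHex) &&
          ((PySem.Chars.lower (cs.drop ((cs.takeWhile (· ≠ '$')).length + 1))).all fun ch => PySem.Chars.isIn [ch] pvHex)) = true := h
      simp only [Bool.and_eq_true, decide_eq_true_eq, List.all_eq_true,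
        PySem.Chars.lower, List.mem_map] at h
      obtain ⟨⟨⟨h32, h64⟩, hsalt⟩, hrest⟩ := h
      refine ⟨cs.takeWhile (· ≠ '$'), cs.drop ((cs.takeWhile (· ≠ '$')).length + 1),
        decomp_of_mem cs hd, h32, h64, ?_, ?_⟩
      · intro c hc; exact hsalt _ ⟨c, hc, rfl⟩
      · intro c hc; exact hrest _ ⟨c, hc, rfl⟩
    · exfalso
      have hin : PySem.Chars.isIn ['$'] cs = false := by
        cases hin : PySem.Chars.isIn ['$'] cs
        · rfl
        · exact absurd ((isIn_dollar_iff cs).mp hin) hd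
      rw [hin] at h
      simp at h
  · rintro ⟨s, r, hdec, h32, h64, hs, hr⟩
    have hd : '$' ∈ cs := by rw [hdec]; simp
    have hsne : ∀ c ∈ s, c ≠ '$' := fun c hc => hexL_ne_dollar (hs c hc)
    have htw : cs.takeWhile (· ≠ '$') = s := by rw [hdec]; exact takeWhile_of_no_dollar s r hsne
    have hdr : cs.drop (s.length + 1) = r := by
      rw [hdec]; simp
    have hin : PySem.Chars.isIn ['$'] cs = true := (isIn_dollar_iff cs).mpr hd
    have hne : cs.isEmpty = false := by
      cases cs with
      | nil => simp at hd
      | cons a b => rfl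
    rw [hne, hin, splitOnMax_dollar cs hd, htw, hdr]
    rw [if_neg (by simp)]
    show (decide (s.length = 32) && decide (r.length = 64) &&
        ((PySem.Chars.lower s).all fun ch => PySem.Chars.isIn [ch] pvHex) &&
        ((PySem.Chars.lower r).all fun ch => PySem.Chars.isIn [ch] pvHex)) = true
    simp only [Bool.and_eq_true, decide_eq_true_eq, List.all_eq_true,
      PySem.Chars.lower, List.mem_map]
    exact ⟨⟨⟨h32, h64⟩, fun c ⟨x, hx, he⟩ => he ▸ hs x hx⟩, fun c ⟨x, hx, he⟩ => he ▸ hr x hx⟩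

-- B = true ↔ pvGood
lemma portB_list (cs : List Char) :
    (if (cs.length : Int) ≠ 97 then false
     else
       (PySem.List.enumerate cs).all (fun p =>
         if p.1 == 32 then p.2 == '$'
         else PySem.Chars.isIn [PySem.Chars.lowerChar p.2] pvHex)) = true ↔ pvGood cs := by
  constructor
  · intro h
    split_ifs at h with hlen
    · have hlen' : cs.length = 97 := by
        simp at hlen
        exact_mod_cast hlen
      simp only [List.all_eq_true] at h
      have hidx : ∀ (k : Nat) (hk : k < cs.length),
          (if (k : Int) == 32 then cs[k] == '$'
           else PySem.Chars.isIn [PySem.Chars.lowerChar cs[k]] pvHex) = true := by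
        intro k hk
        have := h _ ((PySem.List.mem_enumerate_iff _ _ _).mpr ⟨k, hk, rfl⟩)
        simpa using this
      have h32 : cs[32]'(by omega) = '$' := by
        have := hidx 32 (by omega)
        simpa using this
      refine ⟨cs.take 32, cs.drop 33, ?_, by simp [hlen'], by simp [hlen'], ?_, ?_⟩
      · conv_lhs => rw [← List.take_append_drop 32 cs]
        congr 1
        rw [List.drop_eq_getElem_cons (by omega)]
        simp [h32]
      · intro c hc
        obtain ⟨k, hk, he⟩ := List.mem_take_iff_getElem.mp hc
        have hk32 : k < 32 := by omega
        have := hidx k (by omega)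
        rw [if_neg (by simp; omega)] at this
        simpa [pvHexL, ← he] using this
      · intro c hc
        obtain ⟨k, hk, he⟩ := List.getElem_of_mem hc
        rw [List.getElem_drop] at he
        have hk' : k < 64 := by simp [hlen'] at hk; omega
        have := hidx (33 + k) (by omega)
        rw [if_neg (by simp; omega)] at this
        simpa [pvHexL, he] using this
  · rintro ⟨s, r, hdec, h32, h64, hs, hr⟩
    have hlen' : cs.length = 97 := by simp [hdec, h32, h64]
    rw [if_neg (by simp [hlen'])]
    simp only [List.all_eq_true]
    intro p hp
    rw [hdec, PySem.List.enumerate_append, PySem.List.enumerate_cons] at hp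
    rcases List.mem_append.mp hp with hp | hp
    · obtain ⟨k, hk, rfl⟩ := (PySem.List.mem_enumerate_iff _ _ _).mp hp
      rw [if_neg (by simp; omega)]
      exact hs _ (List.getElem_mem hk)
    · rcases List.mem_cons.mp hp with rfl | hp
      · rw [if_pos (by simp [h32])]; simp
      · obtain ⟨k, hk, rfl⟩ := (PySem.List.mem_enumerate_iff _ _ _).mp hp
        rw [if_neg (by simp [h32]; omega)]
        exact hr _ (List.getElem_mem hk)

lemma portB_iff (stored_hash : String) :
    is_legacy_password_hash_py_alt stored_hash = true ↔ pvGood stored_hash.toList := by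
  unfold is_legacy_password_hash_py_alt
  simp only [PySem.Str.len]
  exact portB_list _

-- ===== VERDICT (by name: the statement is the Claim_ definition above) =====
theorem is_legacy_password_hash_py_spec : Claim_equal_is_legacy_password_hash_py := by
  intro stored_hash _
  unfold Spec_is_legacy_password_hash_py
  have := (portA_iff stored_hash).trans (portB_iff stored_hash).symm
  cases hA : is_legacy_password_hash_py stored_hash
  · cases hB : is_legacy_password_hash_py_alt stored_hash
    · rfl
    · exact absurd (this.mpr hB) (by simp [hA])
  · exact (this.mp hA).symm
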